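-- pv_equiv track=rewrite | github.com/weeksjc13/Code | 4140/Project Part 2/mychunker.py | tags_since_vbz
-- ===== SOURCE A (Python) =====
-- def tags_since_vbz(sentence, i):
--   tags = set()
--   for word, pos in sentence[:i]:
--     if (pos == 'VBZ'):
--       tags = set()
--     else:
--       tags.add(pos)
--   return '+'.join(sorted(tags))
-- ===== SOURCE B (Python) =====
-- def _ins(p, out):
--     # insert p into the sorted duplicate-free list out, keeping it sorted and duplicate-free
--     if not out:
--         return [p]
--     q = out[0]
--     if q < p:
--         return [q] + _ins(p, out[1:])
--     if q == p:
--         return out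
--     return [p] + out
--
-- def tags_since_vbz(sentence, i):
--     poss = [pos for word, pos in sentence[:i]]
--     cut = 0
--     for j, p in enumerate(poss):
--         if p == 'VBZ':
--             cut = j + 1
--     out = []
--     for p in poss[cut:]:
--         out = _ins(p, out)
--     return '+'.join(out)
-- ===== Notes on version B (the rewrite author's own statement) =====
-- stated objective: alternative
-- what changed: Replaces A's forward reset-on-VBZ set accumulation plus library sort by a split-point decomposition: find the index after the last 'VBZ', then build the result as a sorted duplicate-free list by ordered insertion over the suffix.
import Mathlib
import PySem

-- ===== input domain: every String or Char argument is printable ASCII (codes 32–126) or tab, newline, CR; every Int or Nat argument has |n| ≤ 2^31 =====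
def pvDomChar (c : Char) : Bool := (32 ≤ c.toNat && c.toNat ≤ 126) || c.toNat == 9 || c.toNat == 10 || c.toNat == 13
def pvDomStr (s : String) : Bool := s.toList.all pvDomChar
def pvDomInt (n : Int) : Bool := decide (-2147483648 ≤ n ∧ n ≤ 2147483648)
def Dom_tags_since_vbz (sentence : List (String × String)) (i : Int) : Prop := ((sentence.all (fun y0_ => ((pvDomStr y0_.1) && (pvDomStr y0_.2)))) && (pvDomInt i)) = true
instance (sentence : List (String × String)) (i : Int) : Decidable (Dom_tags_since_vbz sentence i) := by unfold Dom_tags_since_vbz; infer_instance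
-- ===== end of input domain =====

-- B replaces A's forward reset-on-VBZ set accumulation + library sort by a split-point decomposition:
-- locate the index after the last 'VBZ', then ordered duplicate-free insertion over the suffix (alternative).

-- ===== PORT A =====
-- forward pass: reset the set at each 'VBZ', otherwise add the tag; then join the sorted set
def tags_since_vbz (sentence : List (String × String)) (i : Int) : String :=
  let tags : PySem.Set String :=
    (PySem.List.slice sentence none (some i)).foldl
      (fun tags wp => if wp.2 = "VBZ" then PySem.Set.empty else PySem.Set.add tags wp.2)
      PySem.Set.empty
  PySem.Str.join "+" (PySem.List.sorted tags (fun x => x) false)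

-- ===== PORT B =====
-- _ins: insert p into the sorted duplicate-free list out, keeping it sorted and duplicate-free
def pvIns (p : String) : List String → List String
  | [] => [p]
  | q :: rest => if q < p then q :: pvIns p rest else if q = p then q :: rest else p :: q :: rest

-- find the index after the last 'VBZ', then fold _ins over the suffix, then join
def tags_since_vbz_alt (sentence : List (String × String)) (i : Int) : String :=
  let poss := (PySem.List.slice sentence none (some i)).map Prod.snd
  let cut : Int := (PySem.List.enumerate poss 0).foldl
      (fun c jp => if jp.2 = "VBZ" then jp.1 + 1 else c) 0
  let out := (PySem.List.slice poss (some cut) none).foldl (fun acc p => pvIns p acc) []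
  PySem.Str.join "+" out

-- ===== PRECONDITION & SPEC =====
def Spec_tags_since_vbz (sentence : List (String × String)) (i : Int) (out : String) : Prop := out = tags_since_vbz_alt sentence i
instance (sentence : List (String × String)) (i : Int) (out : String) : Decidable (Spec_tags_since_vbz sentence i out) := by unfold Spec_tags_since_vbz; infer_instance

-- ===== CLAIM (what is proved, stated in full; the proofs are below) =====
def Claim_equal_tags_since_vbz : Prop := ∀ (sentence : List (String × String)) (i : Int), Dom_tags_since_vbz sentence i → Spec_tags_since_vbz sentence i (tags_since_vbz sentence i)

-- ===== LEMMAS AND PROOFS =====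

-- A's fold step, on the POS component
def pvStep (tags : PySem.Set String) (p : String) : PySem.Set String :=
  if p = "VBZ" then PySem.Set.empty else PySem.Set.add tags p

-- suffix of the list strictly after its last "VBZ" (the whole list if none)
def pvAfter : List String → List String
  | [] => []
  | p :: r => if "VBZ" ∈ r then pvAfter r else if p = "VBZ" then r else p :: pvAfter r

lemma foldl_step_no_vbz (xs : List String) (s : PySem.Set String) (h : "VBZ" ∉ xs) :
    xs.foldl pvStep s = xs.foldl PySem.Set.add s := by
  induction xs generalizing s with
  | nil => rfl
  | cons p r ih =>
    simp only [List.mem_cons, not_or] at h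
    have hp : ¬ p = "VBZ" := fun hh => h.1 hh.symm
    simp only [List.foldl_cons, pvStep, if_neg hp]
    exact ih _ h.2

-- characterisation of A's fold: the set of the suffix after the last "VBZ"
lemma foldl_step_eq (xs : List String) (s : PySem.Set String) :
    xs.foldl pvStep s = if "VBZ" ∈ xs then PySem.Set.ofList (pvAfter xs)
                        else xs.foldl PySem.Set.add s := by
  induction xs generalizing s with
  | nil => simp
  | cons p r ih =>
    by_cases hr : "VBZ" ∈ r
    · simp only [List.foldl_cons, ih (pvStep s p), if_pos hr]
      simp [pvAfter, hr, List.mem_cons]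
    · by_cases hp : p = "VBZ"
      · have h2 : PySem.Set.ofList (pvAfter (p :: r)) = r.foldl PySem.Set.add PySem.Set.empty := by
          simp [pvAfter, hr, hp, PySem.Set.ofList_eq_foldl, PySem.Set.empty]
        subst hp
        rw [if_pos (by simp : ("VBZ" : String) ∈ "VBZ" :: r), List.foldl_cons]
        have hstep : pvStep s "VBZ" = PySem.Set.empty := by simp [pvStep]
        rw [hstep, ih PySem.Set.empty, if_neg hr, ← h2]
      · have hm : "VBZ" ∉ p :: r := by
          simp only [List.mem_cons, not_or]
          exact ⟨fun h => hp h.symm, hr⟩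
        simp only [if_neg hm, List.foldl_cons, pvStep, if_neg hp]
        exact foldl_step_no_vbz r _ hr

-- B's cut loop, abstracted
def pvCut (xs : List String) (s c0 : Int) : Int :=
  (PySem.List.enumerate xs s).foldl (fun c jp => if jp.2 = "VBZ" then jp.1 + 1 else c) c0

lemma pvCut_cons (x : String) (r : List String) (s c0 : Int) :
    pvCut (x :: r) s c0 = pvCut r (s + 1) (if x = "VBZ" then s + 1 else c0) := by
  simp [pvCut, PySem.List.enumerate_cons]

lemma pvCut_no_vbz (xs : List String) (s c0 : Int) (h : "VBZ" ∉ xs) : pvCut xs s c0 = c0 := by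
  induction xs generalizing s c0 with
  | nil => rfl
  | cons x r ih =>
    simp only [List.mem_cons, not_or] at h
    have hx : ¬ x = "VBZ" := fun hh => h.1 hh.symm
    rw [pvCut_cons, if_neg hx]
    exact ih _ _ h.2

-- where there is a VBZ, the cut is an absolute index whose suffix is pvAfter
lemma pvCut_vbz (xs : List String) (s c0 : Int) (h : "VBZ" ∈ xs) :
    ∃ j : Nat, pvCut xs s c0 = s + (j : Int) + 1 ∧ xs.drop (j + 1) = pvAfter xs := by
  induction xs generalizing s c0 with
  | nil => simp at h
  | cons x r ih =>
    by_cases hr : "VBZ" ∈ r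
    · obtain ⟨j, hc, hd⟩ := ih (s + 1) (if x = "VBZ" then s + 1 else c0) hr
      refine ⟨j + 1, ?_, ?_⟩
      · rw [pvCut_cons, hc]; push_cast; ring
      · simpa [pvAfter, hr] using hd
    · have hx : x = "VBZ" := by
        rcases List.mem_cons.mp h with h1 | h1
        · exact h1.symm
        · exact absurd h1 hr
      refine ⟨0, ?_, ?_⟩
      · rw [pvCut_cons, if_pos hx, pvCut_no_vbz r _ _ hr]; ring
      · simp [pvAfter, hr, hx]

-- B's insertion fold: membership and sortedness invariants
lemma mem_pvIns (p x : String) (acc : List String) :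
    x ∈ pvIns p acc ↔ x = p ∨ x ∈ acc := by
  induction acc with
  | nil => simp [pvIns]
  | cons q rest ih =>
    by_cases h1 : q < p
    · simp only [pvIns, if_pos h1, List.mem_cons, ih]; tauto
    · by_cases h2 : q = p
      · subst h2
        simp only [pvIns, if_neg h1, if_true, List.mem_cons]
        tauto
      · simp only [pvIns, if_neg h1, if_neg h2, List.mem_cons]

lemma pairwise_pvIns (p : String) (acc : List String) (h : acc.Pairwise (· < ·)) :
    (pvIns p acc).Pairwise (· < ·) := by
  induction acc with
  | nil => simp [pvIns]
  | cons q rest ih =>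
    rw [List.pairwise_cons] at h
    by_cases h1 : q < p
    · rw [pvIns, if_pos h1, List.pairwise_cons]
      refine ⟨?_, ih h.2⟩
      intro a ha
      rcases (mem_pvIns p a rest).mp ha with h2 | h2
      · exact h2 ▸ h1
      · exact h.1 a h2
    · by_cases h2 : q = p
      · rw [pvIns, if_neg h1, if_pos h2, List.pairwise_cons]; exact h
      · rw [pvIns, if_neg h1, if_neg h2, List.pairwise_cons]
        have hpq : p < q := lt_of_le_of_ne (not_lt.mp h1) (fun hh => h2 hh.symm)
        refine ⟨?_, List.pairwise_cons.mpr h⟩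
        intro a ha
        rcases List.mem_cons.mp ha with h3 | h3
        · exact h3 ▸ hpq
        · exact lt_trans hpq (h.1 a h3)

lemma foldl_pvIns_pairwise (xs acc : List String) (h : acc.Pairwise (· < ·)) :
    (xs.foldl (fun acc p => pvIns p acc) acc).Pairwise (· < ·) := by
  induction xs generalizing acc with
  | nil => exact h
  | cons x r ih => exact ih _ (pairwise_pvIns x acc h)

lemma mem_foldl_pvIns (xs acc : List String) (x : String) :
    x ∈ xs.foldl (fun acc p => pvIns p acc) acc ↔ x ∈ xs ∨ x ∈ acc := by
  induction xs generalizing acc with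
  | nil => simp
  | cons y r ih =>
    simp only [List.foldl_cons, ih, mem_pvIns, List.mem_cons]
    tauto

-- B's fold is sorted(set(xs)) for any xs
lemma foldl_pvIns_eq_sorted (xs : List String) :
    PySem.List.sorted (PySem.Set.ofList xs) (fun x => x) false
      = xs.foldl (fun acc p => pvIns p acc) [] := by
  apply PySem.List.sorted_id_eq_of_perm_of_pairwise
  · rw [List.perm_ext_iff_of_nodup
      ((foldl_pvIns_pairwise xs [] (by simp)).imp ne_of_lt)
      (PySem.Set.nodup_ofList _)]
    intro a
    simp [mem_foldl_pvIns, PySem.Set.mem_ofList]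
  · exact (foldl_pvIns_pairwise xs [] (by simp)).imp le_of_lt

-- ===== VERDICT (by name: the statement is the Claim_ definition above) =====
theorem tags_since_vbz_spec : Claim_equal_tags_since_vbz := by
  intro sentence i _
  unfold Spec_tags_since_vbz tags_since_vbz tags_since_vbz_alt
  set poss := (PySem.List.slice sentence none (some i)).map Prod.snd with hposs
  have hfold : (PySem.List.slice sentence none (some i)).foldl
      (fun tags wp => if wp.2 = "VBZ" then PySem.Set.empty else PySem.Set.add tags wp.2)
      PySem.Set.empty = poss.foldl pvStep PySem.Set.empty := by
    rw [hposs, List.foldl_map]; rfl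
  have hcut : (PySem.List.enumerate poss 0).foldl
      (fun c jp => if jp.2 = "VBZ" then jp.1 + 1 else c) 0 = pvCut poss 0 0 := rfl
  by_cases h : "VBZ" ∈ poss
  · obtain ⟨j, hc, hd⟩ := pvCut_vbz poss 0 0 h
    have hc' : pvCut poss 0 0 = ((j + 1 : Nat) : Int) := by rw [hc]; push_cast; ring
    simp only [hfold, hcut, hc', PySem.List.slice_from_natCast, hd,
      foldl_step_eq, if_pos h, foldl_pvIns_eq_sorted]
  · have hc' : pvCut poss 0 0 = ((0 : Nat) : Int) := pvCut_no_vbz poss 0 0 h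
    have hA : poss.foldl pvStep PySem.Set.empty = PySem.Set.ofList poss := by
      rw [foldl_step_eq, if_neg h, PySem.Set.ofList_eq_foldl]; rfl
    simp only [hfold, hcut, hc', PySem.List.slice_from_natCast, List.drop_zero,
      hA, foldl_pvIns_eq_sorted]
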